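-- pv_equiv track=rewrite | github.com/metatronslove/square-checker | Abjad.py | _apply_latin_grammar
-- ===== SOURCE A (Python) =====
-- def _apply_latin_grammar(s: str) -> str:
-- 	vowels = 'aeiou'
-- 	res = ''
-- 	prev_vowel = False
-- 	for ch in s:
-- 		res += ch
-- 		if ch.lower() not in vowels:
-- 			if not prev_vowel:
-- 				res += 'i'
-- 			prev_vowel = False
-- 		else:
-- 			prev_vowel = True
-- 	return res
-- ===== SOURCE B (Python) =====
-- def _apply_latin_grammar(s: str) -> str:
--     V = 'aeiouAEIOU'
--     n = len(s)
--     cuts = [i + 1 for i in range(n) if s[i] not in V and (i == 0 or s[i - 1] not in V)]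
--     return 'i'.join(s[a:b] for a, b in zip([0] + cuts, cuts + [n]))
-- ===== Notes on version B (the rewrite author's own statement) =====
-- stated objective: alternative
-- what changed: Instead of A's single left-to-right pass growing the result char by char with a prev_vowel flag, B first computes the list of insertion positions (indices whose char and predecessor are both non-vowels), then splits the string at those cut points with slices and joins the pieces with 'i'.
import Mathlib
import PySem

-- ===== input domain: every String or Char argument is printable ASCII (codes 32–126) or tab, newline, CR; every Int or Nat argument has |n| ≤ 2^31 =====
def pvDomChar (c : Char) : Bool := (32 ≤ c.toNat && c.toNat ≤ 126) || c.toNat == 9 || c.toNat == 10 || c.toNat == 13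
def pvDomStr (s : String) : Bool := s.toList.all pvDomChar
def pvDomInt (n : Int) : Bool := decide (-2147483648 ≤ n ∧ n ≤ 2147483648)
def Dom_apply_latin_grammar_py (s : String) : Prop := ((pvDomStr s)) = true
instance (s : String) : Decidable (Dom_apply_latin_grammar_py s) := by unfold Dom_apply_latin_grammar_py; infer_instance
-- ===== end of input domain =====

-- B replaces A's single accumulator pass (growing string + prev_vowel flag) by a staged
-- algorithm: first compute the list of insertion positions, then split the string there
-- with slices and join the pieces with 'i' (objective: alternative; same O(n) cost).


-- ===== PORT A =====
-- A's for-loop: state = (res, prev_vowel); `ch.lower() not in vowels` ported with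
-- PySem.Chars.lowerChar / isIn (exact on the ASCII domain)
def pvALoop : List Char → String → Bool → String
  | [], res, _ => res
  | ch :: rest, res, prev_vowel =>
    let res1 := res ++ String.ofList [ch]                  -- res += ch
    if PySem.Chars.isIn [PySem.Chars.lowerChar ch] "aeiou".toList = false then
      pvALoop rest (if prev_vowel = false then res1 ++ "i" else res1) false
    else
      pvALoop rest res1 true

def apply_latin_grammar_py (s : String) : String :=
  pvALoop s.toList "" false

-- ===== PORT B =====
-- Source B: cuts = [i + 1 for i in range(n) if s[i] not in V and (i == 0 or s[i-1] not in V)];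
--       return 'i'.join(s[a:b] for a, b in zip([0] + cuts, cuts + [n]))
-- s[i] / s[i-1] ported with PySem.List.pyGetD (exact: the index is always in range — i comes
-- from range(n) and i-1 is only read when i != 0); s[a:b] with PySem.List.slice.
def apply_latin_grammar_py_alt (s : String) : String :=
  let l := s.toList
  let n : Int := (l.length : Int)
  let cuts : List Int :=
    ((PySem.List.pyRange 0 n 1).filter (fun i =>
        !(PySem.Chars.isIn [PySem.List.pyGetD l i ' '] "aeiouAEIOU".toList)
        && (i == 0 || !(PySem.Chars.isIn [PySem.List.pyGetD l (i - 1) ' '] "aeiouAEIOU".toList)))).map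
      (· + 1)
  PySem.Str.join "i"
    ((((0 : Int) :: cuts).zip (cuts ++ [n])).map
      (fun ab => String.ofList (PySem.List.slice l (some ab.1) (some ab.2))))

-- ===== PRECONDITION & SPEC =====
def Spec_apply_latin_grammar_py (s : String) (out : String) : Prop := out = apply_latin_grammar_py_alt s
instance (s : String) (out : String) : Decidable (Spec_apply_latin_grammar_py s out) := by unfold Spec_apply_latin_grammar_py; infer_instance

-- ===== CLAIM (what is proved, stated in full; the proofs are below) =====
def Claim_equal_apply_latin_grammar_py : Prop := ∀ (s : String), Dom_apply_latin_grammar_py s → Spec_apply_latin_grammar_py s (apply_latin_grammar_py s)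

-- ===== LEMMAS AND PROOFS =====

def pvIsV (c : Char) : Bool := c ∈ "aeiouAEIOU".toList

lemma char_eq_iff_toNat (a b : Char) : a = b ↔ a.toNat = b.toNat := by
  constructor
  · intro h; rw [h]
  · intro h; exact Char.ext (UInt32.toNat_inj.mp h)

lemma isIn_singleton (x : Char) (l : List Char) :
    PySem.Chars.isIn [x] l = (x ∈ l : Bool) := by
  by_cases h : x ∈ l
  · have hinf : [x] <:+: l := by
      obtain ⟨a, b, rfl⟩ := List.append_of_mem h
      exact ⟨a, b, by simp⟩
    simp [h, (PySem.Chars.isIn_iff_infix _ _).2 hinf]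
  · have hninf : ¬ [x] <:+: l := fun hinf => h (hinf.subset (by simp))
    simp [h, (PySem.Chars.isIn_eq_false_iff _ _).2 hninf]

-- A's vowel test `ch.lower() in 'aeiou'` coincides with B's `ch in 'aeiouAEIOU'`
lemma vowel_test_eq (c : Char) :
    PySem.Chars.isIn [PySem.Chars.lowerChar c] "aeiou".toList = pvIsV c := by
  rw [isIn_singleton]
  have haei : "aeiou".toList = ['a','e','i','o','u'] := by decide
  have hall : "aeiouAEIOU".toList = ['a','e','i','o','u','A','E','I','O','U'] := by decide
  simp only [pvIsV, haei, hall, decide_eq_decide]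
  unfold PySem.Chars.lowerChar PySem.Chars.isupper
  have h1 : ('A' ≤ c) ↔ 65 ≤ c.toNat := by
    rw [Char.le_def, UInt32.le_iff_toNat_le]; exact Iff.rfl
  have h2 : (c ≤ 'Z') ↔ c.toNat ≤ 90 := by
    rw [Char.le_def, UInt32.le_iff_toNat_le]; exact Iff.rfl
  by_cases hU : 65 ≤ c.toNat ∧ c.toNat ≤ 90
  · have htn : (Char.ofNat (c.toNat + 32)).toNat = c.toNat + 32 := by
      rw [Char.toNat_ofNat]
      have : (c.toNat + 32).isValidChar := by left; omega
      simp [this]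
    rw [if_pos (by simp only [Bool.and_eq_true, decide_eq_true_eq, h1, h2]; omega)]
    simp only [List.mem_cons, List.not_mem_nil, or_false, char_eq_iff_toNat, htn,
      show ('a' : Char).toNat = 97 from by decide, show ('e' : Char).toNat = 101 from by decide,
      show ('i' : Char).toNat = 105 from by decide, show ('o' : Char).toNat = 111 from by decide,
      show ('u' : Char).toNat = 117 from by decide, show ('A' : Char).toNat = 65 from by decide,
      show ('E' : Char).toNat = 69 from by decide, show ('I' : Char).toNat = 73 from by decide,
      show ('O' : Char).toNat = 79 from by decide, show ('U' : Char).toNat = 85 from by decide]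
    omega
  · rw [if_neg (by simp only [Bool.and_eq_true, decide_eq_true_eq, h1, h2]; omega)]
    simp only [List.mem_cons, List.not_mem_nil, or_false, char_eq_iff_toNat,
      show ('a' : Char).toNat = 97 from by decide, show ('e' : Char).toNat = 101 from by decide,
      show ('i' : Char).toNat = 105 from by decide, show ('o' : Char).toNat = 111 from by decide,
      show ('u' : Char).toNat = 117 from by decide, show ('A' : Char).toNat = 65 from by decide,
      show ('E' : Char).toNat = 69 from by decide, show ('I' : Char).toNat = 73 from by decide,
      show ('O' : Char).toNat = 79 from by decide, show ('U' : Char).toNat = 85 from by decide]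
    omega

-- per-position form: A's output piece at index i is l[i] followed by 'i' iff the condition holds
def pvF (l : List Char) (q : Nat → Bool) : List Char :=
  ((List.range l.length).map (fun i => l.getD i ' ' :: if q i then ['i'] else [])).flatten

-- the zip form of A's output (sentinel p stands for the char before position 0)
def pvZ (l : List Char) (p : Char) : List Char :=
  (((p :: l).zip l).map
    (fun pc => if pvIsV pc.2 || pvIsV pc.1 then [pc.2] else [pc.2, 'i'])).flatten

-- the insertion condition at absolute position i (sentinel '.')
def pvQ (l : List Char) (p : Char) (i : Nat) : Bool :=
  !pvIsV (l.getD i ' ') && !pvIsV ((p :: l).getD i ' ')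

-- cut positions and slice chunks (Nat level)
def pvCuts (q : Nat → Bool) (n : Nat) : List Nat := ((List.range n).filter q).map (· + 1)
def pvSl (l : List Char) (ab : Nat × Nat) : List Char := (l.drop ab.1).take (ab.2 - ab.1)
def pvChunks (l : List Char) (cs : List Nat) (n : Nat) : List (List Char) :=
  ((0 :: cs).zip (cs ++ [n])).map (pvSl l)

-- 'i'.join at the list level
def pvJoinI : List (List Char) → List Char
  | [] => []
  | [x] => x
  | x :: y :: t => x ++ 'i' :: pvJoinI (y :: t)

lemma join_i_eq_joinI : ∀ L, PySem.Chars.join ['i'] L = pvJoinI L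
  | [] => by simp [PySem.Chars.join_nil, pvJoinI]
  | [x] => by simp [PySem.Chars.join_singleton, pvJoinI]
  | x :: y :: t => by
    rw [PySem.Chars.join_cons_cons, join_i_eq_joinI (y :: t)]
    simp [pvJoinI]

lemma joinI_snoc_ext : ∀ (X : List (List Char)) (y z : List Char),
    pvJoinI (X ++ [y ++ z]) = pvJoinI (X ++ [y]) ++ z
  | [], y, z => by simp [pvJoinI]
  | [x], y, z => by simp [pvJoinI]
  | x :: a :: b, y, z => by
    have ih := joinI_snoc_ext (a :: b) y z
    simp only [List.cons_append, pvJoinI] at *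
    rw [ih]; simp

lemma joinI_snoc_nil : ∀ (X : List (List Char)) (y : List Char),
    pvJoinI (X ++ [y] ++ [[]]) = pvJoinI (X ++ [y]) ++ ['i']
  | [], y => by simp [pvJoinI]
  | [x], y => by simp [pvJoinI]
  | x :: a :: b, y => by
    have ih := joinI_snoc_nil (a :: b) y
    simp only [List.cons_append, pvJoinI] at *
    rw [ih]; simp

lemma pairs_decomp (cs : List Nat) (n : Nat) :
    (0 :: cs).zip (cs ++ [n]) =
      ((0 :: cs).dropLast.zip cs) ++ [((0 :: cs).getLast (by simp), n)] := by
  conv_lhs => rw [← List.dropLast_append_getLast (l := 0 :: cs) (by simp)]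
  rw [List.zip_append (by simp)]
  simp

lemma pairs_snoc (cs : List Nat) (m n : Nat) :
    (0 :: (cs ++ [m])).zip ((cs ++ [m]) ++ [n]) =
      ((0 :: cs).zip (cs ++ [m])) ++ [(m, n)] := by
  have h : (0 :: (cs ++ [m])) = (0 :: cs) ++ [m] := by simp
  rw [h, List.zip_append (by simp)]
  simp

lemma sl_append_of_le (l : List Char) (c : Char) (a b : Nat)
    (ha : a ≤ l.length) (hb : b ≤ l.length) :
    pvSl (l ++ [c]) (a, b) = pvSl l (a, b) := by
  simp only [pvSl]
  rw [List.drop_append_of_le_length ha,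
    List.take_append_of_le_length (by simp only [List.length_drop]; omega)]

lemma sl_append_snoc (l : List Char) (c : Char) (a : Nat) (ha : a ≤ l.length) :
    pvSl (l ++ [c]) (a, l.length + 1) = pvSl l (a, l.length) ++ [c] := by
  simp only [pvSl]
  rw [List.drop_append_of_le_length ha]
  rw [List.take_of_length_le (by simp only [List.length_append, List.length_drop,
        List.length_cons, List.length_nil]; omega),
    List.take_of_length_le (by simp only [List.length_drop]; omega)]

lemma cuts_succ (q : Nat → Bool) (n : Nat) :
    pvCuts q (n + 1) = pvCuts q n ++ (if q n then [n + 1] else []) := by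
  simp only [pvCuts, List.range_succ, List.filter_append, List.map_append]
  by_cases h : q n <;> simp [h]

lemma mem_cuts_le (q : Nat → Bool) (n : Nat) : ∀ x ∈ pvCuts q n, x ≤ n := by
  intro x hx
  simp only [pvCuts, List.mem_map, List.mem_filter, List.mem_range] at hx
  obtain ⟨i, ⟨hi, _⟩, rfl⟩ := hx
  omega

lemma F_snoc (l : List Char) (c : Char) (q : Nat → Bool) :
    pvF (l ++ [c]) q = pvF l q ++ (c :: if q l.length then ['i'] else []) := by
  simp only [pvF]
  rw [show (l ++ [c]).length = l.length + 1 from by simp, List.range_succ,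
    List.map_append, List.flatten_append]
  congr 1
  · congr 1
    apply List.map_congr_left
    intro i hi
    rw [List.mem_range] at hi
    rw [List.getD_append _ _ _ _ hi]
  · simp [List.getD]

-- the core lemma: joining the slices at the cut positions = the per-position form
lemma chunks_join_eq_F (q : Nat → Bool) (l : List Char) :
    pvJoinI (pvChunks l (pvCuts q l.length) l.length) = pvF l q := by
  induction l using List.reverseRecOn with
  | nil => simp [pvChunks, pvCuts, pvF, pvSl, pvJoinI]
  | append_singleton l c ih =>
    have hn : (l ++ [c]).length = l.length + 1 := by simp
    have hle := mem_cuts_le q l.length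
    have hlast : ((0 : Nat) :: pvCuts q l.length).getLast (by simp) ≤ l.length := by
      have := List.getLast_mem (l := (0 : Nat) :: pvCuts q l.length) (by simp)
      rcases List.mem_cons.1 this with h | h
      · omega
      · exact hle _ h
    -- inner chunks and extended last chunk over l ++ [c] with final bound l.length + 1
    have hstep : ∀ (m : Nat), m = l.length + 1 →
        pvChunks (l ++ [c]) (pvCuts q l.length) m =
          (((0 :: pvCuts q l.length).dropLast.zip (pvCuts q l.length)).map (pvSl l)) ++
            [pvSl l (((0 :: pvCuts q l.length).getLast (by simp)), l.length) ++ [c]] := by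
      intro m hm
      subst hm
      unfold pvChunks
      rw [pairs_decomp, List.map_append]
      congr 1
      · apply List.map_congr_left
        intro ab hab
        have h2 : ab.2 ∈ pvCuts q l.length := (List.of_mem_zip hab).2
        have h1 : ab.1 ∈ (0 : Nat) :: pvCuts q l.length :=
          (List.dropLast_sublist _).mem (List.of_mem_zip hab).1
        have hb2 : ab.2 ≤ l.length := hle _ h2
        have hb1 : ab.1 ≤ l.length := by
          rcases List.mem_cons.1 h1 with h | h
          · omega
          · exact hle _ h
        exact sl_append_of_le l c ab.1 ab.2 hb1 hb2
      · simp only [List.map_cons, List.map_nil]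
        rw [sl_append_snoc l c _ hlast]
    have hold := pairs_decomp (pvCuts q l.length) l.length
    have holdchunks : pvChunks l (pvCuts q l.length) l.length =
        (((0 :: pvCuts q l.length).dropLast.zip (pvCuts q l.length)).map (pvSl l)) ++
          [pvSl l (((0 :: pvCuts q l.length).getLast (by simp)), l.length)] := by
      unfold pvChunks
      rw [hold, List.map_append]; rfl
    rw [hn, cuts_succ, F_snoc]
    cases hq : q l.length
    · simp only [Bool.false_eq_true, if_false, List.append_nil]
      rw [hstep _ rfl, joinI_snoc_ext, ← holdchunks, ih]
    · simp only [if_true]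
      unfold pvChunks
      rw [pairs_snoc, List.map_append]
      have hmid : ((0 :: pvCuts q l.length).zip (pvCuts q l.length ++ [l.length + 1])).map
          (pvSl (l ++ [c])) = pvChunks (l ++ [c]) (pvCuts q l.length) (l.length + 1) := rfl
      rw [hmid, hstep _ rfl]
      have hsl_nil : pvSl (l ++ [c]) (l.length + 1, l.length + 1) = [] := by
        simp [pvSl]
      simp only [List.map_cons, List.map_nil, hsl_nil]
      rw [joinI_snoc_nil, joinI_snoc_ext, ← holdchunks, ih]
      simp

-- the per-position form with the sentinel condition = the zip form
lemma F_eq_Z : ∀ (l : List Char) (p : Char), pvF l (pvQ l p) = pvZ l p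
  | [], _ => by simp [pvF, pvZ]
  | c :: t, p => by
    have ih := F_eq_Z t c
    simp only [pvF, pvZ, List.length_cons, List.range_succ_eq_map, List.map_cons,
      List.flatten_cons, List.map_map, List.zip_cons_cons]
    congr 1   -- the tail is `ih` up to definitional unfolding; congr discharges it
    cases hc : pvIsV c <;> cases hp : pvIsV p <;> simp [pvQ, hc, hp]

lemma Z_eq_ALoop : ∀ (cs : List Char) (p : Char) (res : String),
    (pvALoop cs res (pvIsV p)).toList = res.toList ++ pvZ cs p
  | [], p, res => by simp [pvALoop, pvZ]
  | c :: t, p, res => by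
    simp only [pvALoop, vowel_test_eq, pvZ, List.zip_cons_cons, List.map_cons, List.flatten_cons]
    by_cases hc : pvIsV c = true
    · rw [if_neg (by simp [hc])]
      rw [show (true : Bool) = pvIsV c from hc.symm, Z_eq_ALoop t c]
      simp [pvZ, hc, String.toList_ofList]
    · have hc' : pvIsV c = false := by simpa using hc
      rw [if_pos hc']
      by_cases hp : pvIsV p = true
      · rw [if_neg (by simp [hp])]
        rw [show (false : Bool) = pvIsV c from hc'.symm, Z_eq_ALoop t c]
        simp [pvZ, hc', hp, String.toList_ofList]
      · have hp' : pvIsV p = false := by simpa using hp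
        rw [if_pos hp']
        rw [show (false : Bool) = pvIsV c from hc'.symm, Z_eq_ALoop t c]
        simp [pvZ, hc', hp', String.toList_ofList]

-- B's Int-level condition is pvQ with sentinel '.'
lemma cond_eq_Q (l : List Char) (k : Nat) :
    (!(PySem.Chars.isIn [PySem.List.pyGetD l (k : Int) ' '] "aeiouAEIOU".toList)
      && ((k : Int) == 0 || !(PySem.Chars.isIn [PySem.List.pyGetD l ((k : Int) - 1) ' '] "aeiouAEIOU".toList)))
      = pvQ l '.' k := by
  cases k with
  | zero =>
    simp [PySem.List.pyGetD_zero, pvQ, pvIsV, isIn_singleton, List.getD]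
  | succ j =>
    have e1 : ((j + 1 : Nat) : Int) - 1 = ((j : Nat) : Int) := by push_cast; ring
    have e0 : (((j + 1 : Nat) : Int) == 0) = false := by
      rw [beq_eq_false_iff_ne]; omega
    rw [e1, e0]
    simp only [PySem.List.pyGetD_natCast, isIn_singleton]
    simp [pvQ, pvIsV, List.getD]

-- B's Int-valued cut list is the Nat-level one, cast
lemma cutsI_eq (l : List Char) :
    ((PySem.List.pyRange 0 (l.length : Int) 1).filter (fun i =>
        !(PySem.Chars.isIn [PySem.List.pyGetD l i ' '] "aeiouAEIOU".toList)
        && (i == 0 || !(PySem.Chars.isIn [PySem.List.pyGetD l (i - 1) ' '] "aeiouAEIOU".toList)))).map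
      (· + 1)
    = (pvCuts (pvQ l '.') l.length).map (fun k : Nat => (k : Int)) := by
  have hrange : PySem.List.pyRange 0 (l.length : Int) 1
      = (List.range l.length).map (fun k : Nat => (k : Int)) := by
    rw [PySem.List.pyRange_one]
    have h1 : ((l.length : Int) - 0).toNat = l.length := by omega
    rw [h1]
    exact List.map_congr_left (fun k _ => by omega)
  rw [hrange, List.filter_map, List.map_map]
  rw [List.filter_congr (fun k _ => by
    simp only [Function.comp]
    exact cond_eq_Q l k)]
  simp only [pvCuts, List.map_map]
  apply List.map_congr_left
  intro k _
  simp only [Function.comp]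
  push_cast
  ring

-- B's Int-indexed slice chunks are the Nat-level ones
lemma chunksI_eq (l : List Char) (cs : List Nat) (n : Nat) :
    ((((0 : Int) :: cs.map (fun k : Nat => (k : Int))).zip
        ((cs.map (fun k : Nat => (k : Int))) ++ [(n : Int)])).map
      (fun ab => PySem.List.slice l (some ab.1) (some ab.2)))
    = pvChunks l cs n := by
  have h0 : ((0 : Int) :: cs.map (fun k : Nat => (k : Int)))
      = ((0 : Nat) :: cs).map (fun k : Nat => (k : Int)) := by simp
  have h1 : cs.map (fun k : Nat => (k : Int)) ++ [(n : Int)]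
      = (cs ++ [n]).map (fun k : Nat => (k : Int)) := by simp
  rw [h0, h1, List.zip_map, List.map_map]
  apply List.map_congr_left
  intro ab _
  simp only [Function.comp, Prod.map]
  rw [PySem.List.slice_natCast]
  rfl

lemma join_parts (parts : List (List Char)) :
    (PySem.Str.join "i" (parts.map String.ofList)).toList = pvJoinI parts := by
  rw [PySem.Str.toList_join, List.map_map]
  have : (String.toList ∘ String.ofList) = id := by
    funext x; simp [String.toList_ofList]
  rw [this, List.map_id, show "i".toList = ['i'] from by decide, join_i_eq_joinI]

-- ===== VERDICT (by name: the statement is the Claim_ definition above) =====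
theorem apply_latin_grammar_py_spec : Claim_equal_apply_latin_grammar_py := by
  intro s _
  unfold Spec_apply_latin_grammar_py apply_latin_grammar_py
  simp only [apply_latin_grammar_py_alt]
  rw [← String.toList_inj]
  rw [show (false : Bool) = pvIsV '.' from by decide, Z_eq_ALoop s.toList '.' ""]
  rw [cutsI_eq s.toList]
  rw [show (fun (ab : Int × Int) => String.ofList (PySem.List.slice s.toList (some ab.1) (some ab.2)))
      = String.ofList ∘ (fun ab => PySem.List.slice s.toList (some ab.1) (some ab.2)) from rfl]
  rw [← List.map_map, join_parts, chunksI_eq s.toList, chunks_join_eq_F, F_eq_Z]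
  simp
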